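-- pv_equiv track=rewrite | github.com/vishesh9131/torchium | torchium/utils/cython_wrapper.py | _fallback_string_optimization
-- ===== SOURCE A (Python) =====
-- from typing import Optional, List, Union
--
-- def _fallback_string_optimization(optimizer_names: List[str]) -> List[str]:
--     """Fallback string optimization."""
--     result = []
--     for name in optimizer_names:
--         lower_name = name.lower()
--         if lower_name.startswith('adam'):
--             result.append('adam_family')
--         elif lower_name.startswith('sgd'):
--             result.append('sgd_family')
--         elif lower_name.startswith('rms'):
--             result.append('rmsprop_family')
--         else:
--             result.append('other')
--     return result
-- ===== SOURCE B (Python) =====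
-- # Classify by folding each name character-by-character through a prefix-trie DFA
-- # (states encode how much of 'adam'/'sgd'/'rms' has been matched; negative = accept),
-- # instead of lowercasing whole strings and running sequential startswith tests.
-- _TRANS = {
--     (0, 'a'): 1, (1, 'd'): 2, (2, 'a'): 3, (3, 'm'): -1,
--     (0, 's'): 4, (4, 'g'): 5, (5, 'd'): -2,
--     (0, 'r'): 6, (6, 'm'): 7, (7, 's'): -3,
-- }
-- _ACCEPT = {-1: 'adam_family', -2: 'sgd_family', -3: 'rmsprop_family'}
--
-- def _fallback_string_optimization(optimizer_names):
--     result = []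
--     for name in optimizer_names:
--         state = 0
--         family = 'other'
--         for ch in name:
--             state = _TRANS.get((state, ch.lower()))
--             if state is None:
--                 break
--             if state < 0:
--                 family = _ACCEPT[state]
--                 break
--         result.append(family)
--     return result
-- ===== Notes on version B (the rewrite author's own statement) =====
-- stated objective: alternative
-- what changed: Replaced the lowercase-whole-string + sequential startswith elif cascade with a prefix-trie DFA: each name is folded character by character (lowercased on the fly) through an explicit state-transition table, accepting as soon as a full prefix is matched.
import Mathlib
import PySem

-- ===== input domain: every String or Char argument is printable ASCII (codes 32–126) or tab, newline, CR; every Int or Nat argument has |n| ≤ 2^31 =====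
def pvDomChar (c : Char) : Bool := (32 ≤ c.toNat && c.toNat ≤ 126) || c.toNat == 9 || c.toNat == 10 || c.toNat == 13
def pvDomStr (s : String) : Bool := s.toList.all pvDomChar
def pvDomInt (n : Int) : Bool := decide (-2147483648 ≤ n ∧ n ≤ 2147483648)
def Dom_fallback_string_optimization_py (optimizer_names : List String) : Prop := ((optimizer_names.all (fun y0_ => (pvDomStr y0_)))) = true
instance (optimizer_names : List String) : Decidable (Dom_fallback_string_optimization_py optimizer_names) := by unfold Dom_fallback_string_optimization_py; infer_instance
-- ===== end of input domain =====

-- B replaces A's lowercase-whole-string + sequential startswith cascade with a prefix-trie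
-- DFA: each name is folded char by char (lowercased on the fly) through a transition table
-- (alternative decomposition; same asymptotic cost).

-- ===== PORT A =====
def fallback_string_optimization_py (optimizer_names : List String) : List String :=
  optimizer_names.foldl (fun result name =>
    let lower_name := PySem.Str.lower name
    if PySem.Str.startswith lower_name "adam" then result ++ ["adam_family"]
    else if PySem.Str.startswith lower_name "sgd" then result ++ ["sgd_family"]
    else if PySem.Str.startswith lower_name "rms" then result ++ ["rmsprop_family"]
    else result ++ ["other"]) []

-- ===== PORT B =====
-- _TRANS: the prefix-trie DFA transition table (dict → association list, keys distinct,
-- .get = first match)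
def pvTrans : List ((Int × Char) × Int) :=
  [((0, 'a'), 1), ((1, 'd'), 2), ((2, 'a'), 3), ((3, 'm'), -1),
   ((0, 's'), 4), ((4, 'g'), 5), ((5, 'd'), -2),
   ((0, 'r'), 6), ((6, 'm'), 7), ((7, 's'), -3)]

-- _ACCEPT (the [state] lookup never misses in B, so the .getD default is unreachable)
def pvAccept : List (Int × String) :=
  [(-1, "adam_family"), (-2, "sgd_family"), (-3, "rmsprop_family")]

-- the inner `for ch in name` loop: step the DFA; break (-> "other") on a missing
-- transition, break with the family on an accepting (negative) state
def pvRun (state : Int) : List Char → String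
  | [] => "other"
  | c :: rest =>
    match ((pvTrans.find? (fun p => p.1 == (state, PySem.Chars.lowerChar c))).map (·.2)) with
    | none => "other"
    | some s =>
      if s < 0 then (((pvAccept.find? (fun p => p.1 == s)).map (·.2)).getD "other")
      else pvRun s rest

def fallback_string_optimization_py_alt (optimizer_names : List String) : List String :=
  optimizer_names.foldl (fun result name => result ++ [pvRun 0 name.toList]) []

-- ===== PRECONDITION & SPEC =====
def Spec_fallback_string_optimization_py (optimizer_names : List String) (out : List String) : Prop := out = fallback_string_optimization_py_alt optimizer_names
instance (optimizer_names : List String) (out : List String) : Decidable (Spec_fallback_string_optimization_py optimizer_names out) := by unfold Spec_fallback_string_optimization_py; infer_instance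

-- ===== CLAIM (what is proved, stated in full; the proofs are below) =====
def Claim_equal_fallback_string_optimization_py : Prop := ∀ (optimizer_names : List String), Dom_fallback_string_optimization_py optimizer_names → Spec_fallback_string_optimization_py optimizer_names (fallback_string_optimization_py optimizer_names)

-- ===== LEMMAS AND PROOFS =====

theorem prodBeq (a c : Int) (b d : Char) : (((a,b) : Int × Char) == (c,d)) = (a == c && b == d) := rfl

theorem pvRun_nil (s : Int) : pvRun s [] = "other" := rfl

theorem pvRun_step0 (c : Char) (rest : List Char) :
    pvRun 0 (c :: rest) =
      (if PySem.Chars.lowerChar c = 'a' then pvRun 1 rest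
       else if PySem.Chars.lowerChar c = 's' then pvRun 4 rest
       else if PySem.Chars.lowerChar c = 'r' then pvRun 6 rest
       else "other") := by
  by_cases h1 : PySem.Chars.lowerChar c = 'a'
  · simp [pvRun, pvTrans, pvAccept, List.find?, prodBeq, h1]
  by_cases h2 : PySem.Chars.lowerChar c = 's'
  · simp [pvRun, pvTrans, pvAccept, List.find?, prodBeq, h1, h2]
  by_cases h3 : PySem.Chars.lowerChar c = 'r'
  · simp [pvRun, pvTrans, pvAccept, List.find?, prodBeq, h1, h2, h3]
  · simp [pvRun, pvTrans, pvAccept, List.find?, prodBeq, h1, h2, h3,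
      beq_eq_false_iff_ne.mpr (fun e => h1 e.symm),
      beq_eq_false_iff_ne.mpr (fun e => h2 e.symm),
      beq_eq_false_iff_ne.mpr (fun e => h3 e.symm)]

theorem pvRun_step1 (c : Char) (rest : List Char) :
    pvRun 1 (c :: rest) =
      (if PySem.Chars.lowerChar c = 'd' then pvRun 2 rest else "other") := by
  by_cases h : PySem.Chars.lowerChar c = 'd'
  · simp [pvRun, pvTrans, pvAccept, List.find?, prodBeq, h]
  · simp [pvRun, pvTrans, pvAccept, List.find?, prodBeq, h,
      beq_eq_false_iff_ne.mpr (fun e => h e.symm)]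

theorem pvRun_step2 (c : Char) (rest : List Char) :
    pvRun 2 (c :: rest) =
      (if PySem.Chars.lowerChar c = 'a' then pvRun 3 rest else "other") := by
  by_cases h : PySem.Chars.lowerChar c = 'a'
  · simp [pvRun, pvTrans, pvAccept, List.find?, prodBeq, h]
  · simp [pvRun, pvTrans, pvAccept, List.find?, prodBeq, h,
      beq_eq_false_iff_ne.mpr (fun e => h e.symm)]

theorem pvRun_step3 (c : Char) (rest : List Char) :
    pvRun 3 (c :: rest) =
      (if PySem.Chars.lowerChar c = 'm' then "adam_family" else "other") := by
  by_cases h : PySem.Chars.lowerChar c = 'm'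
  · simp [pvRun, pvTrans, pvAccept, List.find?, prodBeq, h]
  · simp [pvRun, pvTrans, pvAccept, List.find?, prodBeq, h,
      beq_eq_false_iff_ne.mpr (fun e => h e.symm)]

theorem pvRun_step4 (c : Char) (rest : List Char) :
    pvRun 4 (c :: rest) =
      (if PySem.Chars.lowerChar c = 'g' then pvRun 5 rest else "other") := by
  by_cases h : PySem.Chars.lowerChar c = 'g'
  · simp [pvRun, pvTrans, pvAccept, List.find?, prodBeq, h]
  · simp [pvRun, pvTrans, pvAccept, List.find?, prodBeq, h,
      beq_eq_false_iff_ne.mpr (fun e => h e.symm)]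

theorem pvRun_step5 (c : Char) (rest : List Char) :
    pvRun 5 (c :: rest) =
      (if PySem.Chars.lowerChar c = 'd' then "sgd_family" else "other") := by
  by_cases h : PySem.Chars.lowerChar c = 'd'
  · simp [pvRun, pvTrans, pvAccept, List.find?, prodBeq, h]
  · simp [pvRun, pvTrans, pvAccept, List.find?, prodBeq, h,
      beq_eq_false_iff_ne.mpr (fun e => h e.symm)]

theorem pvRun_step6 (c : Char) (rest : List Char) :
    pvRun 6 (c :: rest) =
      (if PySem.Chars.lowerChar c = 'm' then pvRun 7 rest else "other") := by
  by_cases h : PySem.Chars.lowerChar c = 'm'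
  · simp [pvRun, pvTrans, pvAccept, List.find?, prodBeq, h]
  · simp [pvRun, pvTrans, pvAccept, List.find?, prodBeq, h,
      beq_eq_false_iff_ne.mpr (fun e => h e.symm)]

theorem pvRun_step7 (c : Char) (rest : List Char) :
    pvRun 7 (c :: rest) =
      (if PySem.Chars.lowerChar c = 's' then "rmsprop_family" else "other") := by
  by_cases h : PySem.Chars.lowerChar c = 's'
  · simp [pvRun, pvTrans, pvAccept, List.find?, prodBeq, h]
  · simp [pvRun, pvTrans, pvAccept, List.find?, prodBeq, h,
      beq_eq_false_iff_ne.mpr (fun e => h e.symm)]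

theorem pvRun_eq_branches (cs : List Char) :
    pvRun 0 cs =
      (if PySem.Chars.startswith (cs.map PySem.Chars.lowerChar) ['a','d','a','m'] then "adam_family"
       else if PySem.Chars.startswith (cs.map PySem.Chars.lowerChar) ['s','g','d'] then "sgd_family"
       else if PySem.Chars.startswith (cs.map PySem.Chars.lowerChar) ['r','m','s'] then "rmsprop_family"
       else "other") := by
  rcases cs with _ | ⟨c1, _ | ⟨c2, _ | ⟨c3, _ | ⟨c4, rest⟩⟩⟩⟩ <;>
    simp only [pvRun_step0, pvRun_step1, pvRun_step2, pvRun_step3, pvRun_step4,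
      pvRun_step5, pvRun_step6, pvRun_step7, pvRun_nil, List.map,
      PySem.Chars.startswith, List.isPrefixOf] <;>
    split_ifs <;> (try simp_all) <;> (simp_all [Eq.comm])

theorem pv_branch_eq (name : String) :
    (let lower_name := PySem.Str.lower name
     if PySem.Str.startswith lower_name "adam" then "adam_family"
     else if PySem.Str.startswith lower_name "sgd" then "sgd_family"
     else if PySem.Str.startswith lower_name "rms" then "rmsprop_family"
     else "other") = pvRun 0 name.toList := by
  rw [pvRun_eq_branches]
  have hl : (PySem.Str.lower name).toList = name.toList.map PySem.Chars.lowerChar := by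
    simp [PySem.Str.toList_lower]; rfl
  simp only [PySem.Str.startswith_eq, hl]
  rfl

theorem pv_folds_eq (l : List String) (acc : List String) :
    l.foldl (fun result name =>
      let lower_name := PySem.Str.lower name
      if PySem.Str.startswith lower_name "adam" then result ++ ["adam_family"]
      else if PySem.Str.startswith lower_name "sgd" then result ++ ["sgd_family"]
      else if PySem.Str.startswith lower_name "rms" then result ++ ["rmsprop_family"]
      else result ++ ["other"]) acc
    = l.foldl (fun result name => result ++ [pvRun 0 name.toList]) acc := by
  induction l generalizing acc with
  | nil => rfl
  | cons x xs ih =>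
    simp only [List.foldl_cons]
    rw [← ih]
    congr 1
    have := pv_branch_eq x
    simp only at this
    split_ifs <;> simp_all

-- ===== VERDICT (by name: the statement is the Claim_ definition above) =====
theorem fallback_string_optimization_py_spec : Claim_equal_fallback_string_optimization_py := by
  intro optimizer_names _
  unfold Spec_fallback_string_optimization_py fallback_string_optimization_py
    fallback_string_optimization_py_alt
  exact pv_folds_eq optimizer_names []
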